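-- pv_equiv track=rewrite | github.com/cmulders/advent-of-code | 2019/day16/common.py | fft_right
-- ===== SOURCE A (Python) =====
-- def fft_right(elements):
--     sum = 0
--     output = []
--
--     for item in reversed(elements):
--         sum += item
--         sum %= 10
--         output.append(sum)
--     return ''.join(map(str, reversed(output)))
-- ===== SOURCE B (Python) =====
-- def fft_right(elements):
--     out = ''
--     rem = sum(elements)
--     for x in elements:
--         out += str(rem % 10)
--         rem -= x
--     return out
-- ===== Notes on version B (the rewrite author's own statement) =====
-- stated objective: alternative
-- what changed: Replaces A's backward accumulate-mod-then-reverse-and-join with a forward pass that starts from the exact total and builds the result string directly by concatenation, decrementing the remaining suffix sum per element (no reversal, no intermediate list, no join).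
import Mathlib
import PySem

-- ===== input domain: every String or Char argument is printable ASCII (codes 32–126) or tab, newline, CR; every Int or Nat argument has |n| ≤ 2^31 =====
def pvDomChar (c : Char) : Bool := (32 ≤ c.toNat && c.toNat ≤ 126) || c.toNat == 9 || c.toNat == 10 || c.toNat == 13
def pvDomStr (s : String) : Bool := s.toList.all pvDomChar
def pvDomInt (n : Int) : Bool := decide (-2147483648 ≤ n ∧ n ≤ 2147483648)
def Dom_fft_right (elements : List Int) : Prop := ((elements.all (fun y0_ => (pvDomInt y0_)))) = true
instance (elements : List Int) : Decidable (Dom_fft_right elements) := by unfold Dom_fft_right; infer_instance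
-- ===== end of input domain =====

-- B replaces A's backward accumulate-mod-then-reverse-and-join with a forward string-building pass that decrements the exact remaining suffix sum; alternative decomposition, same cost.


-- ===== PORT A =====
-- sum starts at 0; for item in reversed(elements): sum += item; sum %= 10; output.append(sum); join(reversed(output))
def fft_right (elements : List Int) : String :=
  let st := elements.reverse.foldl
    (fun (p : Int × List Int) item =>
      let s := PySem.Int.mod (p.1 + item) 10
      (s, p.2 ++ [s])) (0, [])
  PySem.Str.join "" (st.2.reverse.map PySem.Int.toStr)

-- ===== PORT B =====
-- the for-loop of Source B as structural recursion over the same state (out, rem)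
def pvLoopB : List Int → String → Int → String
  | [], out, _ => out
  | x :: t, out, rem => pvLoopB t (out ++ PySem.Int.toStr (PySem.Int.mod rem 10)) (rem - x)

-- out = ''; rem = sum(elements); for x: out += str(rem % 10); rem -= x; return out
def fft_right_alt (elements : List Int) : String :=
  pvLoopB elements "" (elements.foldl (· + ·) 0)

-- ===== PRECONDITION & SPEC =====
def Spec_fft_right (elements : List Int) (out : String) : Prop := out = fft_right_alt elements
instance (elements : List Int) (out : String) : Decidable (Spec_fft_right elements out) := by unfold Spec_fft_right; infer_instance

-- ===== CLAIM (what is proved, stated in full; the proofs are below) =====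
def Claim_equal_fft_right : Prop := ∀ (elements : List Int), Dom_fft_right elements → Spec_fft_right elements (fft_right elements)

-- ===== LEMMAS AND PROOFS =====

-- the digits both programs produce, in output order: position i carries (suffix sum from i) mod 10
def pvDigits : List Int → List Int
  | [] => []
  | x :: t => PySem.Int.mod (x + t.sum) 10 :: pvDigits t

lemma pvMod10 (a : Int) : PySem.Int.mod a 10 = a % 10 :=
  PySem.Int.mod_eq_emod_of_pos (by norm_num)

-- A's loop, separated into emitted list and final running state
def pvOutA : List Int → Int → List Int
  | [], _ => []
  | x :: t, s => PySem.Int.mod (s + x) 10 :: pvOutA t (PySem.Int.mod (s + x) 10)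

def pvStA : List Int → Int → Int
  | [], s => s
  | x :: t, s => pvStA t (PySem.Int.mod (s + x) 10)

lemma pvFoldA (l : List Int) (s : Int) (acc : List Int) :
    l.foldl (fun (p : Int × List Int) item =>
      let s := PySem.Int.mod (p.1 + item) 10
      (s, p.2 ++ [s])) (s, acc) = (pvStA l s, acc ++ pvOutA l s) := by
  induction l generalizing s acc with
  | nil => simp [pvStA, pvOutA]
  | cons x t ih =>
      simp only [List.foldl_cons, pvStA, pvOutA]
      rw [ih]
      simp

lemma pvStA_eq (l : List Int) (s : Int) (h : s % 10 = s) :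
    pvStA l s = (s + l.sum) % 10 := by
  induction l generalizing s with
  | nil => simpa [pvStA] using h.symm
  | cons x t ih =>
      rw [pvStA, pvMod10, ih ((s + x) % 10) (by omega)]
      simp only [List.sum_cons]
      omega

lemma pvOutA_append (l₁ l₂ : List Int) (s : Int) :
    pvOutA (l₁ ++ l₂) s = pvOutA l₁ s ++ pvOutA l₂ (pvStA l₁ s) := by
  induction l₁ generalizing s with
  | nil => simp [pvOutA, pvStA]
  | cons x t ih => simp [pvOutA, pvStA, ih]

lemma pvRevA (xs : List Int) : (pvOutA xs.reverse 0).reverse = pvDigits xs := by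
  induction xs with
  | nil => simp [pvOutA, pvDigits]
  | cons x t ih =>
      have hst : pvStA t.reverse 0 = t.sum % 10 := by
        rw [pvStA_eq t.reverse 0 (by omega)]
        simp
      have hhead : PySem.Int.mod (t.sum % 10 + x) 10 = PySem.Int.mod (x + t.sum) 10 := by
        rw [pvMod10, pvMod10]; omega
      simp only [List.reverse_cons, pvOutA_append, hst, pvOutA, List.reverse_append,
        List.reverse_cons, List.reverse_nil, List.nil_append, List.cons_append, pvDigits,
        hhead, ih]

-- empty-separator join peels one part at a time
lemma pvJoinCons (a : String) (l : List String) :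
    PySem.Str.join "" (a :: l) = a ++ PySem.Str.join "" l := by
  rw [← String.toList_inj]
  cases l with
  | nil => simp [PySem.Str.toList_join, PySem.Chars.join_singleton, PySem.Chars.join_nil]
  | cons b t => simp [PySem.Str.toList_join, PySem.Chars.join_cons_cons]

-- B's loop, run on the exact suffix sum, emits the digit string in order
lemma pvLoopB_eq (xs : List Int) (out : String) :
    pvLoopB xs out xs.sum = out ++ PySem.Str.join "" ((pvDigits xs).map PySem.Int.toStr) := by
  induction xs generalizing out with
  | nil => simp [pvLoopB, pvDigits, PySem.Str.join]
  | cons x t ih =>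
      have hrem : (x :: t).sum - x = t.sum := by simp
      rw [pvLoopB, hrem, ih, pvDigits, List.map_cons, pvJoinCons]
      simp [List.sum_cons, String.append_assoc]

lemma pvFoldlSum (l : List Int) : l.foldl (· + ·) 0 = l.sum := by
  simp [List.sum_eq_foldl]

-- ===== VERDICT (by name: the statement is the Claim_ definition above) =====
theorem fft_right_spec : Claim_equal_fft_right := by
  intro elements _
  show fft_right elements = fft_right_alt elements
  simp only [fft_right, fft_right_alt]
  rw [pvFoldA, pvFoldlSum, pvLoopB_eq]
  simp only [List.nil_append]
  rw [pvRevA]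
  simp
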